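-- pv_equiv track=rewrite | github.com/Kickdapie/Sentiment-Analysis-WholeMilk-Consumption | network_analysis.py | get_community_summary
-- ===== SOURCE A (Python) =====
-- from collections import defaultdict
--
-- def get_community_summary(partition, word_freq, top_n_per_community=10):
--     """Summarize each community by its top keywords (by frequency)."""
--     communities = defaultdict(list)
--     for node, comm_id in partition.items():
--         communities[comm_id].append(node)
--     summary = {}
--     for comm_id, members in sorted(communities.items()):
--         # Sort members by frequency
--         ranked = sorted(members, key=lambda w: word_freq.get(w, 0), reverse=True)
--         summary[comm_id] = ranked[:top_n_per_community]
--     return summary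
-- ===== SOURCE B (Python) =====
-- def get_community_summary(partition, word_freq, top_n_per_community=10):
--     """Summarize each community by its top keywords (by frequency)."""
--     # Rank everything once: stable sort by descending frequency, then stable sort by
--     # community id.  Equal keys keep their previous order, so each contiguous run of
--     # one community is already ranked and runs appear in ascending community order;
--     # a single run-scanning pass then emits the summary with no per-community sort.
--     items = sorted(partition.items(), key=lambda kv: -word_freq.get(kv[0], 0))
--     items.sort(key=lambda kv: kv[1])
--     summary = {}
--     i, n = 0, len(items)
--     while i < n:
--         comm_id = items[i][1]
--         members = []
--         while i < n and items[i][1] == comm_id: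
--             members.append(items[i][0])
--             i += 1
--         summary[comm_id] = members[:top_n_per_community]
--     return summary
-- ===== Notes on version B (the rewrite author's own statement) =====
-- stated objective: alternative
-- what changed: B replaces A's bucket-into-a-dict-then-sort-each-community shape by two global stable sorts (by descending frequency, then by community id) followed by a single run-scanning pass that slices each contiguous community run; no dict bucketing and no per-community sort.
import Mathlib
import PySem

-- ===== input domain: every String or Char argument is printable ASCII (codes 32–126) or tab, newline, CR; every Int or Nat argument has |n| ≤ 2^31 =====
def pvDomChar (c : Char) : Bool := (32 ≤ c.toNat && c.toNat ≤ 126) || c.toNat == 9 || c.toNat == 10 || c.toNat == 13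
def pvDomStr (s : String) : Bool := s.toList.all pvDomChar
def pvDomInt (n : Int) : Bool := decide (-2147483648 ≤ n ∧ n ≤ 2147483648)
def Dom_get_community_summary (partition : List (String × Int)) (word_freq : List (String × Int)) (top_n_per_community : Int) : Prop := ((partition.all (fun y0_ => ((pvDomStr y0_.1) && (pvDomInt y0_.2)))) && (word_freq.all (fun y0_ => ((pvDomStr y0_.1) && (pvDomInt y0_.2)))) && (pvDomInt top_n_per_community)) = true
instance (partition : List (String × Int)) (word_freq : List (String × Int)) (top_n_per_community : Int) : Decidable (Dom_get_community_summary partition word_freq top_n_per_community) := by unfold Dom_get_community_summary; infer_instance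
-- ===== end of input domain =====

-- B replaces A's bucket-into-a-dict-then-sort-each-community shape by two global stable
-- sorts followed by one run-scanning pass over the sorted list; same cost, alternative
-- decomposition.

-- ===== PORT A =====
-- the grouping loop 'for node, comm_id in partition.items(): communities[comm_id].append(node)'
def pvGroup (l : List (String × Int)) : PySem.Dict Int (List String) :=
  l.foldl (fun d p => d.modify p.2 [] (fun ms => ms ++ [p.1])) (PySem.Dict.empty : PySem.Dict Int (List String))

def get_community_summary (partition : List (String × Int)) (word_freq : List (String × Int)) (top_n_per_community : Int) : List (Int × List String) :=
  let communities := pvGroup partition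
  -- sorted(communities.items()): dict keys are distinct, so Python's tuple comparison is comparison of the comm ids
  (PySem.List.sorted communities.items (fun q => q.1) false).foldl
    (fun s q => s ++ [(q.1,
      PySem.List.slice
        (PySem.List.sorted q.2 (fun w => (PySem.Dict.mk word_freq).getD w 0) true)
        none (some top_n_per_community))]) []

-- ===== PORT B =====
-- the run-scanning while loop: each iteration consumes one contiguous run of equal comm ids
def pvRuns (topn : Int) : List (String × Int) → List (Int × List String)
  | [] => []
  | (w, c) :: rest =>
      (c, PySem.List.slice (w :: (rest.takeWhile (fun p => p.2 == c)).map (fun p => p.1)) none (some topn))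
        :: pvRuns topn (rest.dropWhile (fun p => p.2 == c))
  termination_by l => l.length
  decreasing_by simpa using Nat.lt_succ_of_le (List.length_dropWhile_le _ _)

def get_community_summary_alt (partition : List (String × Int)) (word_freq : List (String × Int)) (top_n_per_community : Int) : List (Int × List String) :=
  let items := PySem.List.sorted
    (PySem.List.sorted partition (fun kv => -((PySem.Dict.mk word_freq).getD kv.1 0)) false)
    (fun kv => kv.2) false
  pvRuns top_n_per_community items

-- ===== PRECONDITION & SPEC =====
def Spec_get_community_summary (partition : List (String × Int)) (word_freq : List (String × Int)) (top_n_per_community : Int) (out : List (Int × List String)) : Prop := out = get_community_summary_alt partition word_freq top_n_per_community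
instance (partition : List (String × Int)) (word_freq : List (String × Int)) (top_n_per_community : Int) (out : List (Int × List String)) : Decidable (Spec_get_community_summary partition word_freq top_n_per_community out) := by unfold Spec_get_community_summary; infer_instance

-- ===== CLAIM (what is proved, stated in full; the proofs are below) =====
def Claim_equal_get_community_summary : Prop := ∀ (partition : List (String × Int)) (word_freq : List (String × Int)) (top_n_per_community : Int), Dom_get_community_summary partition word_freq top_n_per_community → Spec_get_community_summary partition word_freq top_n_per_community (get_community_summary partition word_freq top_n_per_community)

-- ===== LEMMAS AND PROOFS =====
-- ===== A-side (carried over) =====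
lemma pv_foldl_append_map {α β : Type} (g : α → β) (l : List α) (acc : List β) :
    l.foldl (fun s q => s ++ [g q]) acc = acc ++ l.map g := by
  induction l generalizing acc with
  | nil => simp
  | cons x xs ih => simp [ih]

lemma pv_insertBy_map {α β : Type} (f : α → β) (before : β → β → Bool) (x : α) (l : List α) :
    (PySem.List.insertBy (fun a b => before (f a) (f b)) x l).map f
      = PySem.List.insertBy before (f x) (l.map f) := by
  induction l with
  | nil => simp [PySem.List.insertBy]
  | cons y ys ih =>
    simp only [PySem.List.insertBy, List.map_cons]
    by_cases h : before (f x) (f y)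
    · simp [h]
    · simp [h, ih]

lemma pv_sorted_rev_snoc {α κ : Type} [LinearOrder κ] (key : α → κ) (l : List α) (x : α) :
    PySem.List.sorted (l ++ [x]) key true
      = PySem.List.insertBy (fun a b => decide (key b < key a)) x (PySem.List.sorted l key true) := by
  simp [PySem.List.sorted_rev_eq_foldl_insertBy, List.foldl_append]

lemma pv_map_sorted_rev {α β κ : Type} [LinearOrder κ] (f : α → β) (key : β → κ) (l : List α) :
    PySem.List.sorted (l.map f) key true
      = (PySem.List.sorted l (fun x => key (f x)) true).map f := by
  induction l using List.reverseRecOn with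
  | nil => simp [PySem.List.sorted]
  | append_singleton l x ih =>
    rw [List.map_append, List.map_singleton, pv_sorted_rev_snoc, pv_sorted_rev_snoc, ih,
      pv_insertBy_map f (fun a b => decide (key b < key a))]

lemma pv_insertBy_head {α κ : Type} [LinearOrder κ] (key : α → κ) (x : α) (l : List α)
    (h : ∀ z ∈ l, key z < key x) :
    PySem.List.insertBy (fun a b => decide (key b < key a)) x l = x :: l := by
  cases l with
  | nil => simp [PySem.List.insertBy]
  | cons z zs => simp [PySem.List.insertBy, h z (by simp)]

lemma pv_filter_insertBy {α κ : Type} [LinearOrder κ] (key : α → κ) (q : α → Bool) (x : α)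
    (ys : List α) (h : ys.Pairwise (fun a b => key b ≤ key a)) :
    (PySem.List.insertBy (fun a b => decide (key b < key a)) x ys).filter q
      = if q x then PySem.List.insertBy (fun a b => decide (key b < key a)) x (ys.filter q)
        else ys.filter q := by
  induction ys with
  | nil => cases hx : q x <;> simp [PySem.List.insertBy, hx]
  | cons y ys ih =>
    rw [List.pairwise_cons] at h
    obtain ⟨h1, h2⟩ := h
    by_cases hxy : key y < key x
    · rw [show PySem.List.insertBy (fun a b => decide (key b < key a)) x (y :: ys)
            = x :: y :: ys by simp [PySem.List.insertBy, hxy]]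
      cases hx : q x with
      | false => simp [List.filter, hx]
      | true =>
        cases hy : q y with
        | true =>
          rw [show (y :: ys).filter q = y :: ys.filter q by simp [List.filter, hy]]
          simp [List.filter, hx, hy, PySem.List.insertBy, hxy]
        | false =>
          rw [show (y :: ys).filter q = ys.filter q by simp [List.filter, hy]]
          rw [pv_insertBy_head key x (ys.filter q)
            (fun z hz => lt_of_le_of_lt (h1 z (List.mem_of_mem_filter hz)) hxy)]
          simp [List.filter, hx, hy]
    · rw [show PySem.List.insertBy (fun a b => decide (key b < key a)) x (y :: ys)
            = y :: PySem.List.insertBy (fun a b => decide (key b < key a)) x ys by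
          simp [PySem.List.insertBy, hxy]]
      cases hx : q x with
      | false =>
        cases hy : q y <;> simp [List.filter, hx, hy, ih h2]
      | true =>
        cases hy : q y with
        | false => simp [List.filter, hx, hy, ih h2]
        | true =>
          rw [show (y :: ys).filter q = y :: ys.filter q by simp [List.filter, hy]]
          rw [show PySem.List.insertBy (fun a b => decide (key b < key a)) x (y :: ys.filter q)
                = y :: PySem.List.insertBy (fun a b => decide (key b < key a)) x (ys.filter q) by
              simp [PySem.List.insertBy, hxy]]
          simp [List.filter, hy, ih h2, hx]

lemma pv_filter_sorted_rev {α κ : Type} [LinearOrder κ] (key : α → κ) (q : α → Bool) (l : List α) :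
    (PySem.List.sorted l key true).filter q = PySem.List.sorted (l.filter q) key true := by
  induction l using List.reverseRecOn with
  | nil => simp [PySem.List.sorted]
  | append_singleton l x ih =>
    rw [pv_sorted_rev_snoc,
      pv_filter_insertBy key q x _ (PySem.List.sorted_pairwise_rev l key),
      List.filter_append, ih]
    cases hx : q x with
    | true => simp [hx, pv_sorted_rev_snoc]
    | false => simp [hx]

lemma pv_keys_group (l : List (String × Int)) :
    (pvGroup l).keys = PySem.Set.ofList (l.map (fun p => p.2)) := by
  unfold pvGroup
  simp only [PySem.Dict.modify.eq_1]
  rw [PySem.Dict.keys_foldl_insert_key l (fun p => p.2) (fun d p => d.getD p.2 [] ++ [p.1])]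
  simp [PySem.Set.update_eq_append_filter, PySem.Dict.keys_empty]

lemma pv_getD_group (l : List (String × Int)) (c : Int) :
    (pvGroup l).getD c [] = (l.filter (fun p => p.2 == c)).map (fun p => p.1) := by
  unfold pvGroup
  have h := PySem.Dict.getD_foldl_modify_append (l.map (fun p => (p.2, p.1)))
    (PySem.Dict.empty : PySem.Dict Int (List String)) c
  rw [List.foldl_map] at h
  simpa [List.filter_map, Function.comp, PySem.Dict.getD, PySem.Dict.empty] using h

lemma pv_items_group (l : List (String × Int)) :
    (pvGroup l).items
      = (PySem.Set.ofList (l.map (fun p => p.2))).map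
          (fun c => (c, (l.filter (fun p => p.2 == c)).map (fun p => p.1))) := by
  have hnd : (pvGroup l).keys.Nodup := by
    rw [pv_keys_group]; exact PySem.Set.nodup_ofList _
  rw [PySem.Dict.items_eq_map_keys _ hnd [], pv_keys_group]
  exact List.map_congr_left (fun c _ => by rw [pv_getD_group])

lemma pv_sorted_items_group (l : List (String × Int)) :
    PySem.List.sorted (pvGroup l).items (fun q => q.1) false
      = (PySem.List.sorted (PySem.Set.ofList (l.map (fun p => p.2))) (fun c => c) false).map
          (fun c => (c, (l.filter (fun p => p.2 == c)).map (fun p => p.1))) := by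
  apply PySem.List.sorted_eq_of_perm_of_pairwise_lt
  · rw [pv_items_group]
    exact (PySem.List.sorted_perm _ _ _).map _
  · have := PySem.List.sorted_ofList_pairwise_lt (l.map (fun p => p.2))
    exact List.Pairwise.map _ (fun a b hab => hab) this

-- ===== B-side =====
lemma pv_sorted_neg_key {α : Type} (k : α → Int) (l : List α) :
    PySem.List.sorted l (fun x => -(k x)) false = PySem.List.sorted l k true := by
  rw [PySem.List.sorted_eq_foldl_insertBy, PySem.List.sorted_rev_eq_foldl_insertBy]
  have : (fun a b => decide (-(k a) < -(k b))) = (fun a b : α => decide (k b < k a)) := by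
    funext a b; simp
  rw [this]

lemma pv_sorted_snoc {α κ : Type} [LinearOrder κ] (key : α → κ) (l : List α) (x : α) :
    PySem.List.sorted (l ++ [x]) key false
      = PySem.List.insertBy (fun a b => decide (key a < key b)) x (PySem.List.sorted l key false) := by
  simp [PySem.List.sorted_eq_foldl_insertBy, List.foldl_append]

-- stability: filtering the elements whose key is exactly c commutes with insertion
lemma pv_filter_insertBy_const {α : Type} (key : α → Int) (c : Int) (x : α) (ys : List α)
    (h : ys.Pairwise (fun a b => key a ≤ key b)) :
    (PySem.List.insertBy (fun a b => decide (key a < key b)) x ys).filter (fun z => key z == c)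
      = ys.filter (fun z => key z == c) ++ (if key x == c then [x] else []) := by
  induction ys with
  | nil => cases hx : key x == c <;> simp [PySem.List.insertBy, hx]
  | cons y ys ih =>
    rw [List.pairwise_cons] at h
    obtain ⟨h1, h2⟩ := h
    by_cases hxy : key x < key y
    · rw [show PySem.List.insertBy (fun a b => decide (key a < key b)) x (y :: ys)
            = x :: y :: ys by simp [PySem.List.insertBy, hxy]]
      cases hx : key x == c with
      | false => simp [List.filter, hx]
      | true =>
        have hxc : key x = c := by simpa using hx
        have hnone : ∀ z ∈ y :: ys, ¬ (key z == c) = true := by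
          intro z hz hzc
          have hzc' : key z = c := by simpa using hzc
          rcases List.mem_cons.1 hz with rfl | hz'
          · omega
          · have := h1 z hz'; omega
        rw [List.filter_cons_of_pos (by simpa using hx)]
        rw [List.filter_eq_nil_iff.2 hnone]
        simp
    · rw [show PySem.List.insertBy (fun a b => decide (key a < key b)) x (y :: ys)
            = y :: PySem.List.insertBy (fun a b => decide (key a < key b)) x ys by
          simp [PySem.List.insertBy, hxy]]
      cases hy : key y == c with
      | true => simp [List.filter, hy, ih h2]
      | false => simp [List.filter, hy, ih h2]

lemma pv_filter_sorted_const {α : Type} (key : α → Int) (c : Int) (l : List α) :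
    (PySem.List.sorted l key false).filter (fun z => key z == c)
      = l.filter (fun z => key z == c) := by
  induction l using List.reverseRecOn with
  | nil => simp [PySem.List.sorted]
  | append_singleton l x ih =>
    rw [pv_sorted_snoc, pv_filter_insertBy_const key c x _ (PySem.List.sorted_pairwise l key),
      ih, List.filter_append]
    cases hx : key x == c <;> simp [List.filter, hx]

lemma pv_foldl_add_sublist {α : Type} [BEq α] (xs s : List α) :
    List.Sublist (xs.foldl PySem.Set.add s) (s ++ xs) := by
  induction xs generalizing s with
  | nil => simp
  | cons x xs ih =>
    refine (ih (PySem.Set.add s x)).trans ?_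
    by_cases h : PySem.Set.contains s x
    · simp only [PySem.Set.add, h, if_pos]
      exact List.Sublist.append (List.Sublist.refl s) (List.sublist_cons_self x xs)
    · simp only [PySem.Set.add, h, if_neg, Bool.not_eq_true]
      rw [List.append_assoc]
      exact List.Sublist.append (List.Sublist.refl s) (by simp)

lemma pv_ofList_sublist {α : Type} [BEq α] (xs : List α) :
    List.Sublist (PySem.Set.ofList xs) xs := by
  have := pv_foldl_add_sublist xs ([] : List α)
  simpa [PySem.Set.ofList_eq_foldl] using this

lemma pv_foldl_add_of_run {α : Type} [BEq α] [LawfulBEq α] (c : α) (xs : List α) (s : List α)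
    (hc : c ∈ s) (hxs : ∀ y ∈ xs, y = c) :
    xs.foldl PySem.Set.add s = s := by
  induction xs with
  | nil => rfl
  | cons x xs ih =>
    have hx : x = c := hxs x (by simp)
    have : PySem.Set.add s x = s := by
      simp [PySem.Set.add, PySem.Set.contains, hx, hc]
    rw [List.foldl_cons, this]
    exact ih (fun y hy => hxs y (by simp [hy]))

lemma pv_foldl_add_cons {α : Type} [BEq α] [LawfulBEq α] (c : α) (ys s : List α)
    (h : ∀ y ∈ ys, y ≠ c) :
    ys.foldl PySem.Set.add (c :: s) = c :: ys.foldl PySem.Set.add s := by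
  induction ys generalizing s with
  | nil => rfl
  | cons y ys ih =>
    have hyc : y ≠ c := h y (by simp)
    have hadd : PySem.Set.add (c :: s) y = c :: PySem.Set.add s y := by
      simp only [PySem.Set.add, PySem.Set.contains, List.contains_iff_mem, List.mem_cons]
      by_cases hm : y ∈ s
      · simp [hm, hyc]
      · simp [hm, hyc]
    rw [List.foldl_cons, hadd, List.foldl_cons]
    exact ih (PySem.Set.add s y) (fun z hz => h z (by simp [hz]))

lemma pv_ofList_run {α : Type} [BEq α] [LawfulBEq α] (c : α) (xs ys : List α)
    (hxs : ∀ y ∈ xs, y = c) (hys : ∀ y ∈ ys, y ≠ c) :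
    PySem.Set.ofList (c :: xs ++ ys) = c :: PySem.Set.ofList ys := by
  rw [PySem.Set.ofList_eq_foldl, PySem.Set.ofList_eq_foldl]
  rw [List.cons_append, List.foldl_cons, List.foldl_append]
  have h0 : PySem.Set.add ([] : List α) c = [c] := by simp [PySem.Set.add, PySem.Set.contains]
  rw [h0, pv_foldl_add_of_run c xs [c] (by simp) hxs]
  exact pv_foldl_add_cons c ys [] hys

lemma pv_runs_eq_aux (topn : Int) : ∀ (n : Nat) (l : List (String × Int)), l.length ≤ n →
    l.Pairwise (fun a b => a.2 ≤ b.2) →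
    pvRuns topn l
      = (PySem.Set.ofList (l.map (fun p => p.2))).map
          (fun c => (c, PySem.List.slice ((l.filter (fun p => p.2 == c)).map (fun p => p.1)) none (some topn))) := by
  intro n
  induction n with
  | zero =>
    intro l hl _
    have : l = [] := List.length_eq_zero_iff.1 (Nat.le_zero.1 hl)
    subst this
    simp [pvRuns, PySem.Set.ofList]
  | succ n ih =>
    intro l hl hp
    cases l with
    | nil => simp [pvRuns, PySem.Set.ofList]
    | cons hd rest =>
      obtain ⟨w, c⟩ := hd
      rw [List.pairwise_cons] at hp
      obtain ⟨hge, hprest⟩ := hp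
      set t := rest.takeWhile (fun p => p.2 == c) with htdef
      set d := rest.dropWhile (fun p => p.2 == c) with hddef
      have hrest : t ++ d = rest := List.takeWhile_append_dropWhile
      have ht : ∀ p ∈ t, p.2 = c := by
        intro p hpt
        have := List.mem_takeWhile_imp hpt
        simpa using this
      have hdsub : List.Sublist d rest := List.dropWhile_sublist _
      have hpd : d.Pairwise (fun a b => a.2 ≤ b.2) := hprest.sublist hdsub
      have hd_gt : ∀ p ∈ d, c < p.2 := by
        cases hdd : d with
        | nil => intro p hp; simp at hp
        | cons e d' =>
          have hehead : (e.2 == c) = false := by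
            have := List.head?_dropWhile_not (fun p => p.2 == c) rest
            rw [← hddef, hdd] at this
            simpa using this
          have hec : c < e.2 := by
            have h1 : c ≤ e.2 := hge e (hdsub.mem (by rw [hdd]; simp))
            have h2 : e.2 ≠ c := by simpa using hehead
            omega
          intro p hp
          rw [hdd, List.pairwise_cons] at hpd
          rcases List.mem_cons.1 hp with rfl | hp'
          · exact hec
          · exact lt_of_lt_of_le hec (hpd.1 p hp')
      -- unfold one step of pvRuns
      rw [show pvRuns topn ((w, c) :: rest)
            = (c, PySem.List.slice (w :: t.map (fun p => p.1)) none (some topn))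
              :: pvRuns topn d by rw [pvRuns]]
      -- the communities list
      have hmap : ((w, c) :: rest).map (fun p => p.2) = c :: (t.map (fun p => p.2) ++ d.map (fun p => p.2)) := by
        rw [← hrest]; simp
      have hset : PySem.Set.ofList (((w, c) :: rest).map (fun p => p.2))
          = c :: PySem.Set.ofList (d.map (fun p => p.2)) := by
        rw [hmap]
        exact pv_ofList_run c _ _
          (by intro y hy; obtain ⟨p, hpt, rfl⟩ := List.mem_map.1 hy; exact ht p hpt)
          (by intro y hy; obtain ⟨p, hpd', rfl⟩ := List.mem_map.1 hy; exact ne_of_gt (hd_gt p hpd'))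
      rw [hset, List.map_cons]
      congr 1
      · -- the c-run
        congr 2
        have h1 : t.filter (fun p => p.2 == c) = t :=
          List.filter_eq_self.2 (fun p hpt => by simp [ht p hpt])
        have h2 : d.filter (fun p => p.2 == c) = [] :=
          List.filter_eq_nil_iff.2 (fun p hpd' => by
            have := hd_gt p hpd'; simp; omega)
        have hfc : ((w, c) :: rest).filter (fun p => p.2 == c) = (w, c) :: t := by
          rw [← hrest, List.filter_cons_of_pos (by simp), List.filter_append, h1, h2,
            List.append_nil]
        rw [hfc]; simp
      · -- the remaining runs
        rw [ih d (by
          have : d.length ≤ rest.length := List.length_dropWhile_le _ _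
          simpa using le_trans this (Nat.succ_le_succ_iff.1 hl)) hpd]
        apply List.map_congr_left
        intro c' hc'
        have hc'd : c' ∈ d.map (fun p => p.2) := (PySem.Set.mem_ofList _ _).1 hc'
        obtain ⟨p0, hp0, rfl⟩ := List.mem_map.1 hc'd
        have hcc' : c < p0.2 := hd_gt p0 hp0
        congr 2
        have h1 : t.filter (fun p => p.2 == p0.2) = [] :=
          List.filter_eq_nil_iff.2 (fun p hpt => by
            have := ht p hpt; simp; omega)
        rw [← hrest, List.filter_cons_of_neg (by simp; omega), List.filter_append, h1,
          List.nil_append]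

lemma pv_runs_eq (topn : Int) (l : List (String × Int))
    (h : l.Pairwise (fun a b => a.2 ≤ b.2)) :
    pvRuns topn l
      = (PySem.Set.ofList (l.map (fun p => p.2))).map
          (fun c => (c, PySem.List.slice ((l.filter (fun p => p.2 == c)).map (fun p => p.1)) none (some topn))) :=
  pv_runs_eq_aux topn l.length l le_rfl h

lemma pv_comms (partition : List (String × Int)) (k : (String × Int) → Int) :
    PySem.List.sorted (PySem.Set.ofList (partition.map (fun p => p.2))) (fun c => c) false
      = PySem.Set.ofList ((PySem.List.sorted (PySem.List.sorted partition k false) (fun kv => kv.2) false).map (fun p => p.2)) := by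
  apply PySem.List.sorted_id_eq_of_perm_of_pairwise
  · apply (List.perm_ext_iff_of_nodup (PySem.Set.nodup_ofList _) (PySem.Set.nodup_ofList _)).2
    intro c
    rw [PySem.Set.mem_ofList, PySem.Set.mem_ofList]
    have hperm : (PySem.List.sorted (PySem.List.sorted partition k false) (fun kv => kv.2) false).Perm partition :=
      (PySem.List.sorted_perm _ _ _).trans (PySem.List.sorted_perm _ _ _)
    exact (hperm.map (fun p => p.2)).mem_iff
  · have h1 : ((PySem.List.sorted (PySem.List.sorted partition k false) (fun kv => kv.2) false).map (fun p => p.2)).Pairwise (· ≤ ·) := by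
      rw [List.pairwise_map]
      exact PySem.List.sorted_pairwise _ _
    exact List.Pairwise.sublist (pv_ofList_sublist _) h1

theorem pv_main (partition word_freq : List (String × Int)) (topn : Int) :
    get_community_summary partition word_freq topn
      = get_community_summary_alt partition word_freq topn := by
  simp only [get_community_summary, get_community_summary_alt]
  rw [pv_foldl_append_map, pv_sorted_items_group, List.nil_append, List.map_map]
  rw [pv_runs_eq topn _ (PySem.List.sorted_pairwise _ _),
    ← pv_comms partition (fun kv => -((PySem.Dict.mk word_freq).getD kv.1 0))]
  apply List.map_congr_left
  intro c _
  simp only [Function.comp]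
  congr 1
  rw [pv_map_sorted_rev, pv_filter_sorted_const, pv_sorted_neg_key, pv_filter_sorted_rev]

-- ===== VERDICT (by name: the statement is the Claim_ definition above) =====
theorem get_community_summary_spec : Claim_equal_get_community_summary := by
  intro partition word_freq top_n_per_community _
  unfold Spec_get_community_summary
  exact pv_main partition word_freq top_n_per_community
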